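-- pv_equiv track=rewrite | github.com/ruhz3/coding-test | Python/boj/1284.py | solution
-- ===== SOURCE A (Python) =====
-- def solution(num: int) -> int:
--     word_width = 1
--     while num > 0:
--         last_num = num % 10
--         if last_num == 0:
--             word_width += 5
--         elif last_num == 1:
--             word_width += 3
--         else:
--             word_width += 4
--         num = int(num/10)
--
--     return word_width
-- ===== SOURCE B (Python) =====
-- def solution(num: int) -> int:
--     # Collect the decimal digits once, then combine class tallies in a closed form
--     # instead of branching 0/1/else on every digit while accumulating.
--     if num <= 0:
--         return 1
--     digits = []
--     n = num
--     while n > 0: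
--         digits.append(n % 10)
--         n //= 10
--     zeros = digits.count(0)
--     ones = digits.count(1)
--     return 1 + 5 * zeros + 3 * ones + 4 * (len(digits) - zeros - ones)
-- ===== Notes on version B (the rewrite author's own statement) =====
-- stated objective: alternative
-- what changed: B gathers the digit list once, counts the 0s and 1s, and returns the width by the closed formula 1 + 5*zeros + 3*ones + 4*rest, replacing A's per-digit 0/1/else branch on a running accumulator.
import Mathlib
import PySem

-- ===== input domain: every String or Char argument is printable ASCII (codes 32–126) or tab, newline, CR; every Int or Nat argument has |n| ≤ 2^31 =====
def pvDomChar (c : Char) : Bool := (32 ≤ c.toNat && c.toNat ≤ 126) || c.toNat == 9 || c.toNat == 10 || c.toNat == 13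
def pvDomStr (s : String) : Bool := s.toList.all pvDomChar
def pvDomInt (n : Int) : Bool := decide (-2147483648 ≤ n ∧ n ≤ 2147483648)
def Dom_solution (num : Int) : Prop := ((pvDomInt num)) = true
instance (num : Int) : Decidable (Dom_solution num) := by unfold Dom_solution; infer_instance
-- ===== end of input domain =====

-- B collects the digit list once, counts 0s and 1s and combines them in a closed
-- formula, instead of A's per-digit 0/1/else branch on a running accumulator (objective: alternative).


-- ===== PORT A =====
-- A's while loop: acc is word_width; 'num = int(num/10)' is PySem.Int.truncdiv
def solutionLoop (num acc : Int) : Int :=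
  if _h : 0 < num then
    let last_num := PySem.Int.mod num 10
    let acc' := if last_num = 0 then acc + 5 else if last_num = 1 then acc + 3 else acc + 4
    solutionLoop (PySem.Int.truncdiv num 10) acc'
  else acc
termination_by num.toNat
decreasing_by
  simp only [PySem.Int.truncdiv]
  have h1 : num.tdiv 10 = num / 10 := Int.tdiv_eq_ediv_of_nonneg (by omega)
  omega

def solution (num : Int) : Int := solutionLoop num 1

-- ===== PORT B =====
-- B's while loop: digits.append(n % 10); n //= 10
def altDigits (n : Int) (acc : List Int) : List Int :=
  if _h : 0 < n then
    altDigits (PySem.Int.floordiv n 10) (acc ++ [PySem.Int.mod n 10])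
  else acc
termination_by n.toNat
decreasing_by
  rw [PySem.Int.floordiv_eq_ediv_of_pos (by omega : (0:Int) < 10)]
  omega

def solution_alt (num : Int) : Int :=
  if num ≤ 0 then 1
  else
    let digits := altDigits num []
    let zeros : Int := PySem.List.count digits 0
    let ones : Int := PySem.List.count digits 1
    1 + 5 * zeros + 3 * ones + 4 * (PySem.List.len digits - zeros - ones)

-- ===== PRECONDITION & SPEC =====
def Spec_solution (num : Int) (out : Int) : Prop := out = solution_alt num
instance (num : Int) (out : Int) : Decidable (Spec_solution num out) := by unfold Spec_solution; infer_instance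

-- ===== CLAIM (what is proved, stated in full; the proofs are below) =====
def Claim_equal_solution : Prop := ∀ (num : Int), Dom_solution num → Spec_solution num (solution num)

-- ===== LEMMAS AND PROOFS =====

-- proof-side width of a digit list, matching B's closed formula
def digitsWidth (ds : List Int) : Int :=
  5 * (PySem.List.count ds 0 : Int) + 3 * (PySem.List.count ds 1 : Int)
    + 4 * (PySem.List.len ds - (PySem.List.count ds 0 : Int) - (PySem.List.count ds 1 : Int))

lemma digitsWidth_append (ds : List Int) (d : Int) :
    digitsWidth (ds ++ [d]) =
      digitsWidth ds + (if d = 0 then 5 else if d = 1 then 3 else 4) := by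
  simp only [digitsWidth, PySem.List.count, PySem.List.len_eq, List.count_append,
    List.length_append, List.count_singleton, List.length_singleton]
  by_cases h0 : d = 0
  · subst h0; simp; ring
  · by_cases h1 : d = 1
    · subst h1; simp; ring
    · simp [beq_iff_eq, h0, h1]; ring

lemma truncdiv_eq_floordiv (n : Int) (hn : 0 < n) :
    PySem.Int.truncdiv n 10 = PySem.Int.floordiv n 10 := by
  rw [PySem.Int.floordiv_eq_ediv_of_pos (by omega : (0:Int) < 10)]
  exact Int.tdiv_eq_ediv_of_nonneg (by omega)

lemma solutionLoop_add_aux (k : Nat) : ∀ (n a w : Int), n.toNat ≤ k →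
    solutionLoop n (a + w) = a + solutionLoop n w := by
  induction k with
  | zero =>
    intro n a w hk
    conv_lhs => rw [solutionLoop]
    conv_rhs => rw [solutionLoop]
    simp [show ¬ 0 < n by omega]
  | succ k ih =>
    intro n a w hk
    by_cases h : 0 < n
    · conv_lhs => rw [solutionLoop]
      conv_rhs => rw [solutionLoop]
      simp only [dif_pos h]
      have hrec : (PySem.Int.truncdiv n 10).toNat ≤ k := by
        rw [truncdiv_eq_floordiv n h,
            PySem.Int.floordiv_eq_ediv_of_pos (by omega : (0:Int) < 10)]
        omega
      split_ifs with h0 h1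
      · rw [show a + w + 5 = a + (w + 5) by ring]; exact ih _ a _ hrec
      · rw [show a + w + 3 = a + (w + 3) by ring]; exact ih _ a _ hrec
      · rw [show a + w + 4 = a + (w + 4) by ring]; exact ih _ a _ hrec
    · conv_lhs => rw [solutionLoop]
      conv_rhs => rw [solutionLoop]
      simp [h]

lemma solutionLoop_add (n a w : Int) : solutionLoop n (a + w) = a + solutionLoop n w :=
  solutionLoop_add_aux n.toNat n a w (le_refl _)

lemma solutionLoop_zero_shift (n w : Int) : solutionLoop n w = w + solutionLoop n 0 := by
  have := solutionLoop_add n w 0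
  simpa using this

lemma altDigits_width (n : Int) (acc : List Int) :
    digitsWidth (altDigits n acc) = digitsWidth acc + solutionLoop n 0 := by
  induction n, acc using altDigits.induct with
  | case1 n acc h ih =>
    rw [altDigits, solutionLoop]
    simp only [dif_pos h]
    rw [ih, digitsWidth_append, truncdiv_eq_floordiv n h]
    split_ifs <;> (conv_rhs => rw [solutionLoop_zero_shift]) <;> ring
  | case2 n acc h =>
    rw [altDigits, solutionLoop]
    simp [h]

-- ===== VERDICT (by name: the statement is the Claim_ definition above) =====
theorem solution_spec : Claim_equal_solution := by
  intro num _
  unfold Spec_solution solution solution_alt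
  by_cases hle : num ≤ 0
  · rw [solutionLoop]; simp [hle, show ¬ 0 < num by omega]
  · simp only [hle, if_neg, not_false_iff]
    have hw := altDigits_width num []
    have hsh := solutionLoop_zero_shift num 1
    have hnil : digitsWidth ([] : List Int) = 0 := by simp [digitsWidth, PySem.List.count]
    simp only [digitsWidth] at hw hnil
    omega
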